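-- pv_equiv track=rewrite | github.com/JonathonYan1993/ML_NaiveBayes_SVM_NeuralNet_EnsembleL_Cluster_PCA_numpy | NaiveBayesClassifier/NaiveBayesClassifier_news.py | texts2Features
-- ===== SOURCE A (Python) =====
-- def texts2Features(train_data_list,test_data_list,feature_words):
--     """
--     function:根据特征集feature_words将训练集与测试集向量化
--     parameters: train_data_list - 训练集
--                 test_data_list - 测试集
--                 feature_words - 特征集
--     Returns: train_feature_list - 训练集向量化列表
--              test_feature_list - 测试集向量化列表
--     """
--     #定义一个函数，该函数创建一个feature_words尺寸大小的列表，如果特征词在该文本中，则该特征词相应位置标记为1，如此返回一个该文本对应的特征向量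
--     def text_feature(text,feature_words):
--         text_words=set(text)  #对文本进行清洗，返回一个不重复的词汇列表
--         feature=[1 if word in text_words else 0 for word in feature_words]
--         return feature
--     train_feature_list=[text_feature(text,feature_words) for text in train_data_list] #创建训练集向量列表
--     test_feature_list=[text_feature(text,feature_words) for text in test_data_list] #创建测试集向量列表
--     return train_feature_list,test_feature_list
-- ===== SOURCE B (Python) =====
-- def texts2Features(train_data_list, test_data_list, feature_words):
--     # inverted index: each feature word -> all positions it occupies
--     index = {}
--     for i, word in enumerate(feature_words):
--         index.setdefault(word, []).append(i)
--     n = len(feature_words)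
--
--     def text_feature(text):
--         feature = [0] * n
--         for word in set(text):
--             for pos in index.get(word, []):
--                 feature[pos] = 1
--         return feature
--
--     train_feature_list = [text_feature(text) for text in train_data_list]
--     test_feature_list = [text_feature(text) for text in test_data_list]
--     return train_feature_list, test_feature_list
-- ===== Notes on version B (the rewrite author's own statement) =====
-- stated objective: faster
-- what changed: Replaces the per-text scan over all feature words with an inverted index (word -> list of positions) built once; each text starts from a zero vector and only its distinct words' positions are set to 1.
import Mathlib
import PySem

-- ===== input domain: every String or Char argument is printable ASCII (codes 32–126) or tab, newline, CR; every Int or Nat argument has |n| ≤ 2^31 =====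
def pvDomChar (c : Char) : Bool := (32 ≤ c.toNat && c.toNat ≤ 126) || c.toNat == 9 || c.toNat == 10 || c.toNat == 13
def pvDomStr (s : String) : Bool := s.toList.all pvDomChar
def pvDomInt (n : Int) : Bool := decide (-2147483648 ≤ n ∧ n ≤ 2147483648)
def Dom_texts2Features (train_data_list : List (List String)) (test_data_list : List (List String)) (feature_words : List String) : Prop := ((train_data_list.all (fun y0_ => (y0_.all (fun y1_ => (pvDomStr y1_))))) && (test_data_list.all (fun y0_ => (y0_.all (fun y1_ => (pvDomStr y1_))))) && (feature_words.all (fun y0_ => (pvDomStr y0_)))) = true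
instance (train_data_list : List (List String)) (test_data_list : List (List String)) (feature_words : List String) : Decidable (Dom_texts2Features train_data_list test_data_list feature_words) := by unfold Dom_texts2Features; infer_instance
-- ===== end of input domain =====

-- B replaces A's per-text scan over all feature words by an inverted index (feature word -> all its
-- positions) built once; each text starts from a zero vector and only the positions of its distinct
-- words are set to 1 (alternative decomposition, same result).

-- ===== PORT A =====
-- text_feature(text, feature_words): [1 if word in set(text) else 0 for word in feature_words]
def pvTextFeatureA (text : List String) (feature_words : List String) : List Int :=
  let text_words := PySem.Set.ofList text
  feature_words.map (fun word => if text_words.contains word then (1 : Int) else 0)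

def texts2Features (train_data_list : List (List String)) (test_data_list : List (List String)) (feature_words : List String) : List (List Int) × List (List Int) :=
  let train_feature_list := train_data_list.map (fun text => pvTextFeatureA text feature_words)
  let test_feature_list := test_data_list.map (fun text => pvTextFeatureA text feature_words)
  (train_feature_list, test_feature_list)

-- ===== PORT B =====
-- index = {}; for i, word in enumerate(feature_words): index.setdefault(word, []).append(i)
def pvIndex (feature_words : List String) : PySem.Dict String (List Int) :=
  (PySem.List.enumerate feature_words 0).foldl
    (fun d p => d.modify p.2 [] (fun l => l ++ [p.1])) PySem.Dict.empty

-- feature = [0]*n; for word in set(text): for pos in index.get(word, []): feature[pos] = 1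
-- (iterating a Python set: the result is order-independent — only the constant 1 is ever written)
def pvTextFeatureB (index : PySem.Dict String (List Int)) (n : Nat) (text : List String) : List Int :=
  (PySem.Set.ofList text).foldl
    (fun feature word =>
      (index.getD word []).foldl (fun feature pos => PySem.List.pySetD feature pos (1 : Int)) feature)
    (List.replicate n 0)

def texts2Features_alt (train_data_list : List (List String)) (test_data_list : List (List String)) (feature_words : List String) : List (List Int) × List (List Int) :=
  let index := pvIndex feature_words
  let n := feature_words.length
  (train_data_list.map (fun text => pvTextFeatureB index n text),
   test_data_list.map (fun text => pvTextFeatureB index n text))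

-- ===== PRECONDITION & SPEC =====
def Spec_texts2Features (train_data_list : List (List String)) (test_data_list : List (List String)) (feature_words : List String) (out : List (List Int) × List (List Int)) : Prop := out = texts2Features_alt train_data_list test_data_list feature_words
instance (train_data_list : List (List String)) (test_data_list : List (List String)) (feature_words : List String) (out : List (List Int) × List (List Int)) : Decidable (Spec_texts2Features train_data_list test_data_list feature_words out) := by unfold Spec_texts2Features; infer_instance

-- ===== CLAIM (what is proved, stated in full; the proofs are below) =====
def Claim_equal_texts2Features : Prop := ∀ (train_data_list : List (List String)) (test_data_list : List (List String)) (feature_words : List String), Dom_texts2Features train_data_list test_data_list feature_words → Spec_texts2Features train_data_list test_data_list feature_words (texts2Features train_data_list test_data_list feature_words)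

-- ===== LEMMAS AND PROOFS =====

-- the inverted index maps w to exactly the positions j (as casts of naturals) with fw[j] = w
theorem pv_mem_idx (fw : List String) (w : String) (j : Nat) :
    ((j : Int) ∈ (pvIndex fw).getD w []) ↔ ∃ _ : j < fw.length, fw[j] = w := by
  have h := PySem.Dict.getD_foldl_modify_append
    (l := (PySem.List.enumerate fw 0).map (fun p => (p.2, p.1)))
    (d := (PySem.Dict.empty : PySem.Dict String (List Int))) (c := w)
  rw [List.foldl_map] at h
  simp only [pvIndex] at *
  rw [h]
  simp [List.mem_filter, PySem.List.mem_enumerate_iff]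

-- every stored position is nonnegative (enumerate starts at 0)
theorem pv_idx_nonneg (fw : List String) (w : String) :
    ∀ p ∈ (pvIndex fw).getD w [], 0 ≤ p := by
  have h := PySem.Dict.getD_foldl_modify_append
    (l := (PySem.List.enumerate fw 0).map (fun p => (p.2, p.1)))
    (d := (PySem.Dict.empty : PySem.Dict String (List Int))) (c := w)
  rw [List.foldl_map] at h
  simp only [pvIndex] at *
  rw [h]
  simp [List.mem_filter, PySem.List.mem_enumerate_iff]
  rintro p k hk - rfl
  positivity

-- inner loop: writing 1 at a list of nonnegative positions, described pointwise
theorem pv_setOnes_getElem? (poss : List Int) (hnn : ∀ p ∈ poss, 0 ≤ p)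
    (v : List Int) (j : Nat) :
    (poss.foldl (fun f p => PySem.List.pySetD f p 1) v)[j]? =
      if (j : Int) ∈ poss ∧ j < v.length then some 1 else v[j]? := by
  induction poss generalizing v with
  | nil => simp
  | cons p ps ih =>
    have hp : 0 ≤ p := hnn p (by simp)
    have hlen : (PySem.List.pySetD v p 1).length = v.length := PySem.List.length_pySetD v p 1
    rw [List.foldl_cons, ih (fun q hq => hnn q (by simp [hq])), hlen,
      PySem.List.pySetD_of_nonneg (h := hp), List.getElem?_set]
    by_cases hmem : (j : Int) ∈ ps <;> by_cases hj : j < v.length <;>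
      by_cases hpj : p = (j : Int) <;>
      simp_all <;> (try split_ifs) <;> simp_all <;> omega

theorem pv_setOnes_length (poss : List Int) (v : List Int) :
    (poss.foldl (fun f p => PySem.List.pySetD f p 1) v).length = v.length := by
  induction poss generalizing v with
  | nil => rfl
  | cons p ps ih => rw [List.foldl_cons, ih, PySem.List.length_pySetD]

-- outer loop over the text's distinct words, described pointwise
theorem pv_rows_getElem? (fw : List String) (ws : List String) (v : List Int) (j : Nat) :
    (ws.foldl (fun feature word =>
        ((pvIndex fw).getD word []).foldl
          (fun feature pos => PySem.List.pySetD feature pos 1) feature) v)[j]? =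
      if (∃ w ∈ ws, (j : Int) ∈ (pvIndex fw).getD w []) ∧ j < v.length then some 1
      else v[j]? := by
  induction ws generalizing v with
  | nil => simp
  | cons w0 ws ih =>
    rw [List.foldl_cons, ih, pv_setOnes_length,
      pv_setOnes_getElem? _ (pv_idx_nonneg fw w0)]
    by_cases h0 : (j : Int) ∈ (pvIndex fw).getD w0 [] <;>
      by_cases hmem : ∃ w ∈ ws, (j : Int) ∈ (pvIndex fw).getD w [] <;>
      by_cases hj : j < v.length <;> simp_all

-- the two per-text feature rows agree
theorem pv_row_eq (fw : List String) (text : List String) :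
    pvTextFeatureA text fw = pvTextFeatureB (pvIndex fw) fw.length text := by
  apply List.ext_getElem?
  intro j
  rw [pvTextFeatureB, pv_rows_getElem?, List.length_replicate]
  by_cases hj : j < fw.length
  · have hex : (∃ w ∈ PySem.Set.ofList text, (j : Int) ∈ (pvIndex fw).getD w []) ↔ fw[j] ∈ text := by
      simp only [pv_mem_idx, PySem.Set.mem_ofList]
      simp [hj]
    simp [pvTextFeatureA, hj, PySem.Set.contains, PySem.Set.mem_ofList]
    split_ifs <;> simp_all [PySem.Set.mem_ofList]
  · simp [pvTextFeatureA, hj]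

-- ===== VERDICT (by name: the statement is the Claim_ definition above) =====
theorem texts2Features_spec : Claim_equal_texts2Features := by
  intro tr te fw _
  unfold Spec_texts2Features texts2Features texts2Features_alt
  simp [pv_row_eq]
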